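-- pv_equiv track=rewrite | github.com/welikeheon/little-by-little | (100) Programmers/Level1/puppet_claw_crane.py | solution
-- ===== SOURCE A (Python) =====
-- def solution(board, moves):
--     answer = 0
--     moved = []
--     stacks = []
--
--     # create stacks
--     for i in range(len(board[0])):
--         stacks.append(list())
--         for j in range(len(board)):
--             if board[j][i] != 0:
--                 stacks[i].append(board[j][i])
--         stacks[i] = stacks[i][::-1] # flip the stack
--
--     for m in moves:
--         if stacks[m-1]: # if there is something to be popped
--             e = stacks[m-1].pop() # pop it
--
--             # if the popped element is same with the top of moved stack,
--             if moved and moved[-1] == e: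
--                 moved.pop()  # pop the top of the moved stack
--                 answer += 2  # two elements are removed
--             else:
--                 moved.append(e)
--
--     return answer
-- ===== SOURCE B (Python) =====
-- def solution(board, moves):
--     height = len(board)
--     width = len(board[0])
--     tops = [0] * width  # next row to read from the top, per column
--     moved = []
--     answer = 0
--     for m in moves:
--         c = m - 1
--         r = tops[c]
--         while r < height and board[r][c] == 0:
--             r += 1
--         if r < height:
--             e = board[r][c]
--             tops[c] = r + 1
--             if moved and moved[-1] == e:
--                 moved.pop()
--                 answer += 2
--             else:
--                 moved.append(e)
--         else:
--             tops[c] = r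
--     return answer
-- ===== Notes on version B (the rewrite author's own statement) =====
-- stated objective: alternative
-- what changed: B drops A's upfront pass that builds reversed per-column stacks and instead keeps a per-column pointer array tops, lazily skipping zero cells of a column only when that column is actually moved on; the basket matching is applied to the lazily fetched doll.
-- outside the precondition, e.g. on solution([[1, 1], [1, 1, 5]], [0, 0]): A returns 2, B returns 0
import Mathlib
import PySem

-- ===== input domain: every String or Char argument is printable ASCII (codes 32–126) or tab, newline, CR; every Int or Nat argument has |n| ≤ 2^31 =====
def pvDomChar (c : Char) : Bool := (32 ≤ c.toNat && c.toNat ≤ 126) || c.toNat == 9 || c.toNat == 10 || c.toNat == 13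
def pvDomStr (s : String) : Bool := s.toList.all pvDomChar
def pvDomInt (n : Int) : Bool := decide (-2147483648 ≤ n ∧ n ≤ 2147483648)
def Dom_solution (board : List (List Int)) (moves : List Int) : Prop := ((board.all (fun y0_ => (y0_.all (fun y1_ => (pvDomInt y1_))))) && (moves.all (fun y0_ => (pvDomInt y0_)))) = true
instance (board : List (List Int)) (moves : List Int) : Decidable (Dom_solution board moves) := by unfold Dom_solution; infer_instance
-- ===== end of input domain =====

-- B replaces A's upfront build of reversed per-column stks by per-column top pointers that
-- read the board lazily while the moves are processed (objective: alternative decomposition).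

-- ===== PORT A =====
-- one move of A's loop: pop from the pre-built stack stks[m-1], then the basket logic
def stepA (st : List (List Int) × List Int × Int) (m : Int) : List (List Int) × List Int × Int :=
  let s := PySem.List.pyGetD st.1 (m - 1) []
  if s ≠ [] then
    let e := PySem.List.pyGetD s (-1) 0                       -- s.pop() : the last element …
    let stks' := PySem.List.pySetD st.1 (m - 1) s.dropLast  -- … is removed from stks[m-1]
    if st.2.1 ≠ [] ∧ PySem.List.pyGetD st.2.1 (-1) 0 = e then
      (stks', st.2.1.dropLast, st.2.2 + 2)
    else
      (stks', st.2.1 ++ [e], st.2.2)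
  else st

def solution (board : List (List Int)) (moves : List Int) : Int :=
  let width := (PySem.List.pyGetD board 0 []).length          -- len(board[0]) (Pre_ excludes board = [])
  -- for i in range(width): collect the nonzero column entries, then flip ([::-1] = reverse)
  let stks := (PySem.List.pyRange 0 (width : Int) 1).map (fun i =>
    ((PySem.List.pyRange 0 ((board.length : Nat) : Int) 1).foldl (fun col j =>
        if PySem.List.pyGetD (PySem.List.pyGetD board j []) i 0 ≠ 0 then
          col ++ [PySem.List.pyGetD (PySem.List.pyGetD board j []) i 0]
        else col) []).reverse)
  (moves.foldl stepA (stks, ([] : List Int), (0 : Int))).2.2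

-- ===== PORT B =====
-- the while loop of B: number of zero cells of column c from the current pointer downwards
def skipZeros (c : Int) (rows : List (List Int)) : Nat :=
  match rows with
  | [] => 0
  | row :: rest => if PySem.List.pyGetD row c 0 = 0 then skipZeros c rest + 1 else 0

-- one move of B's loop: advance the column pointer past zeros, take the doll, basket logic
def stepB (board : List (List Int)) (st : List Nat × List Int × Int) (m : Int) :
    List Nat × List Int × Int :=
  let c := m - 1
  let t := PySem.List.pyGetD st.1 c 0
  let r := t + skipZeros c (board.drop t)
  if r < board.length then
    let e := PySem.List.pyGetD (PySem.List.pyGetD board ((r : Nat) : Int) []) c 0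
    let tops' := PySem.List.pySetD st.1 c (r + 1)
    if st.2.1 ≠ [] ∧ PySem.List.pyGetD st.2.1 (-1) 0 = e then
      (tops', st.2.1.dropLast, st.2.2 + 2)
    else
      (tops', st.2.1 ++ [e], st.2.2)
  else (PySem.List.pySetD st.1 c r, st.2.1, st.2.2)

def solution_alt (board : List (List Int)) (moves : List Int) : Int :=
  let width := (PySem.List.pyGetD board 0 []).length
  (moves.foldl (stepB board) (List.replicate width 0, ([] : List Int), (0 : Int))).2.2

-- ===== PRECONDITION & SPEC =====
-- Pre_ excludes empty boards, boards with a row shorter than the first row, and moves m with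
-- m-1 outside the Python index range [-width, width): on all of those A raises IndexError.  It
-- also excludes the combination of a wraparound move (m <= 0, reaching a column through Python's
-- negative indexing) with a board whose rows are longer than the first row: there A returns a
-- value assembled from column width-|m-1| while B's lazy read takes row[m-1] from the end of each
-- (longer) row — both are accidents of indexing on ragged input; see the cite in the claim.
def Pre_solution (board : List (List Int)) (moves : List Int) : Prop :=
  board ≠ [] ∧ (∀ row ∈ board, (board.headD []).length ≤ row.length) ∧
  (∀ m ∈ moves, 1 - (((board.headD []).length : Nat) : Int) ≤ m ∧
    m ≤ (((board.headD []).length : Nat) : Int)) ∧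
  ((∃ m ∈ moves, m ≤ 0) → ∀ row ∈ board, row.length = (board.headD []).length)

instance (board : List (List Int)) (moves : List Int) : Decidable (Pre_solution board moves) := by
  unfold Pre_solution; infer_instance

def pvWitness_solution : List (List Int) × List Int := ([[0, 1], [2, 3]], [1, 2, 2, 1])

def Spec_solution (board : List (List Int)) (moves : List Int) (out : Int) : Prop :=
  out = solution_alt board moves
instance (board : List (List Int)) (moves : List Int) (out : Int) : Decidable (Spec_solution board moves out) := by unfold Spec_solution; infer_instance

-- ===== CLAIM (what is proved, stated in full; the proofs are below) =====
def Claim_equal_solution : Prop := ∀ (board : List (List Int)) (moves : List Int), Dom_solution board moves → Pre_solution board moves → Spec_solution board moves (solution board moves)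

-- ===== LEMMAS AND PROOFS =====

-- the nonzero entries of column k of the given rows, top to bottom
def fcol (k : Nat) (rows : List (List Int)) : List Int :=
  (rows.map (fun row => PySem.List.pyGetD row ((k : Nat) : Int) 0)).filter (fun x => x ≠ 0)

-- the loop invariant tying A's stack state to B's pointer state
def StInv (board : List (List Int)) (stks : List (List Int)) (tops : List Nat) : Prop :=
  let width := (board.headD []).length
  stks.length = width ∧ tops.length = width ∧
  ∀ k, k < width → tops.getD k 0 ≤ board.length ∧
    stks.getD k [] = (fcol k (board.drop (tops.getD k 0))).reverse

lemma skip_le (c : Int) (rows : List (List Int)) : skipZeros c rows ≤ rows.length := by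
  induction rows with
  | nil => simp [skipZeros]
  | cons row rest ih =>
    simp only [skipZeros]
    split
    · simpa using ih
    · simp

lemma skip_filter (c : Int) (rows : List (List Int)) :
    ((rows.drop (skipZeros c rows)).map (fun row => PySem.List.pyGetD row c 0)).filter
        (fun x => x ≠ 0)
      = (rows.map (fun row => PySem.List.pyGetD row c 0)).filter (fun x => x ≠ 0) := by
  induction rows with
  | nil => simp
  | cons row rest ih =>
    simp only [skipZeros]
    split
    · next h0 => simpa [h0] using ih
    · simp

lemma skip_head (c : Int) (rows : List (List Int)) (row : List Int) (rest : List (List Int))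
    (h : rows.drop (skipZeros c rows) = row :: rest) : PySem.List.pyGetD row c 0 ≠ 0 := by
  induction rows generalizing row rest with
  | nil => simp at h
  | cons r0 rs ih =>
    simp only [skipZeros] at h
    split at h
    · exact ih _ _ h
    · next h0 =>
      simp only [List.drop_zero, List.cons.injEq] at h
      rw [← h.1]; exact h0

def normIdx (i : Int) (w : Nat) : Nat := if i < 0 then (i + w).toNat else i.toNat

lemma pyGetD_norm {α : Type} (xs : List α) (i : Int) (d : α)
    (h1 : -(xs.length : Int) ≤ i) (h2 : i < (xs.length : Int)) :
    PySem.List.pyGetD xs i d = xs.getD (normIdx i xs.length) d := by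
  by_cases h0 : i < 0
  · rw [show normIdx i xs.length = (i + xs.length).toNat from if_pos h0]
    rw [show i = -((((-i).toNat : Nat)) : Int) by omega]
    rw [PySem.List.pyGetD_neg_natCast xs (-i).toNat d (by omega) (by omega)]
    rw [List.getD_eq_getElem xs d (by omega)]
    congr 1
    omega
  · rw [show normIdx i xs.length = i.toNat from if_neg h0]
    rw [PySem.List.pyGetD_eq_getElem (xs := xs) (i := i) (d := d) (by omega) h2]
    rw [List.getD_eq_getElem xs d (by omega)]

lemma pySetD_norm {α : Type} (xs : List α) (i : Int) (v : α)
    (h1 : -(xs.length : Int) ≤ i) (h2 : i < (xs.length : Int)) :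
    PySem.List.pySetD xs i v = xs.set (normIdx i xs.length) v := by
  by_cases h0 : i < 0
  · rw [show normIdx i xs.length = (i + xs.length).toNat from if_pos h0]
    simp only [PySem.List.pySetD, PySem.List.pySet?, PySem.List.pyIdx?,
      if_neg (show ¬ (0:Int) ≤ i by omega), if_pos h1]
    simp only [Option.map_some, Option.getD_some]
    congr 1
    omega
  · rw [show normIdx i xs.length = i.toNat from if_neg h0]
    exact PySem.List.pySetD_of_nonneg (xs := xs) (i := i) (v := v) (by omega)

lemma skipZeros_congr (c c' : Int) (rows : List (List Int))
    (h : ∀ row ∈ rows, PySem.List.pyGetD row c 0 = PySem.List.pyGetD row c' 0) :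
    skipZeros c rows = skipZeros c' rows := by
  induction rows with
  | nil => rfl
  | cons row rest ih =>
    simp only [skipZeros, h row (by simp)]
    rw [ih (fun r hr => h r (by simp [hr]))]

lemma step_eq (board : List (List Int)) (stks : List (List Int)) (tops : List Nat)
    (moved : List Int) (ans : Int) (m : Int)
    (hm1 : 1 - (((board.headD []).length : Nat) : Int) ≤ m)
    (hm2 : m ≤ (((board.headD []).length : Nat) : Int))
    (hrect : m ≤ 0 → ∀ row ∈ board, row.length = (board.headD []).length)
    (hInv : StInv board stks tops) :
    (stepA (stks, moved, ans) m).2 = (stepB board (tops, moved, ans) m).2 ∧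
    StInv board (stepA (stks, moved, ans) m).1 (stepB board (tops, moved, ans) m).1 := by
  obtain ⟨hsl, htl, hcols⟩ := hInv
  have hw1 : 0 < (board.headD []).length := by omega
  set k : Nat := normIdx (m - 1) (board.headD []).length with hkdef
  have hkw : k < (board.headD []).length := by rw [hkdef]; unfold normIdx; split <;> omega
  have hkcast : ¬ m - 1 < 0 → ((k : Nat) : Int) = m - 1 := by
    intro h0; rw [hkdef]; unfold normIdx; rw [if_neg h0]; omega
  have hrowmem : ∀ row ∈ board, PySem.List.pyGetD row (m - 1) 0
      = PySem.List.pyGetD row ((k : Nat) : Int) 0 := by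
    intro row hr
    by_cases h0 : m - 1 < 0
    · have hrl := hrect (by omega) row hr
      rw [pyGetD_norm row (m - 1) 0 (by omega) (by omega),
        PySem.List.pyGetD_natCast, hrl, ← hkdef]
    · rw [hkcast h0]
  obtain ⟨ht, hs⟩ := hcols k hkw
  set t := tops.getD k 0 with htdef
  set rows := board.drop t with hrowsdef
  set skip := skipZeros (k : Int) rows with hskipdef
  have hskiple := skip_le (k : Int) rows
  have hrowslen : rows.length = board.length - t := by simp [hrowsdef]
  have hGa : PySem.List.pyGetD stks (m - 1) [] = stks.getD k [] := by
    rw [pyGetD_norm stks (m - 1) [] (by omega) (by omega), hsl, ← hkdef]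
  have hGt : PySem.List.pyGetD tops (m - 1) 0 = t := by
    rw [pyGetD_norm tops (m - 1) 0 (by omega) (by omega), htl, ← hkdef, ← htdef]
  have hSa : ∀ v : List Int, PySem.List.pySetD stks (m - 1) v = stks.set k v := by
    intro v
    rw [pySetD_norm stks (m - 1) v (by omega) (by omega), hsl, ← hkdef]
  have hSt : ∀ v : Nat, PySem.List.pySetD tops (m - 1) v = tops.set k v := by
    intro v
    rw [pySetD_norm tops (m - 1) v (by omega) (by omega), htl, ← hkdef]
  have hskipc : skipZeros (m - 1) rows = skip := by
    rw [hskipdef]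
    exact skipZeros_congr _ _ rows
      (fun row hr => hrowmem row (List.mem_of_mem_drop (hrowsdef ▸ hr)))
  simp only [stepA, stepB, hGa, hGt, hSa, hSt, ← htdef, ← hrowsdef, hskipc, ← hskipdef]
  cases hdrop : rows.drop skip with
  | nil =>
    have hskipeq : skip = rows.length := le_antisymm hskiple (List.drop_eq_nil_iff.mp hdrop)
    have hnil : fcol k rows = [] := by
      have h1 := skip_filter (k : Int) rows
      rw [hdrop] at h1
      simpa [fcol] using h1.symm
    have hsnil : stks.getD k [] = [] := by rw [hs, hnil]; rfl
    have hnlt : ¬ (t + skip < board.length) := by omega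
    rw [hsnil]
    refine ⟨by simp [hnlt], ?_⟩
    simp only [ne_eq, not_true_eq_false, if_false, if_neg hnlt]
    refine ⟨hsl, by simp [htl], ?_⟩
    intro j hj
    by_cases hjk : j = k
    · subst hjk
      have hset : ((tops.set k (t + skip)).getD k 0) = t + skip := by
        simp [List.getD, htl ▸ hkw]
      constructor
      · rw [hset]; omega
      · rw [hset, hs, hnil]
        have hbd : board.drop (t + skip) = [] := by
          rw [← List.drop_drop, ← hrowsdef, hdrop]
        rw [hbd]
        simp [fcol]
    · have hkj : ¬ (k = j) := fun h => hjk (Eq.symm h)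
      have hset : ((tops.set k (t + skip)).getD j 0) = tops.getD j 0 := by
        simp [List.getD, hkj]
      rw [hset]
      exact hcols j hj
  | cons row rest =>
    have hne0 := skip_head (k : Int) rows row rest hdrop
    have hskiplt : skip < rows.length := by
      have hlen := congrArg List.length hdrop
      simp at hlen; omega
    have hrlt : t + skip < board.length := by omega
    have hfv : PySem.List.pyGetD row ((k : Nat) : Int) 0 = row.getD k 0 :=
      PySem.List.pyGetD_natCast row k 0
    rw [hfv] at hne0
    have hfcol : fcol k rows = row.getD k 0 :: fcol k rest := by
      have h1 := skip_filter (k : Int) rows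
      rw [hdrop] at h1
      have hne0' : ¬ row[k]?.getD 0 = 0 := by simpa [List.getD] using hne0
      simp only [fcol, ← h1, List.map_cons, List.filter_cons, hfv]
      simp [List.getD, hne0']
    have hsval : stks.getD k [] = (fcol k rest).reverse ++ [row.getD k 0] := by
      rw [hs, hfcol, List.reverse_cons]
    have hrow : board.getD (t + skip) [] = row := by
      have hsome : board[t + skip]? = some row := by
        rw [← List.getElem?_drop, ← hrowsdef]
        have h0 := List.getElem?_drop (xs := rows) (i := skip) (j := 0)
        rw [hdrop] at h0
        simpa using h0.symm
      simp [List.getD, hsome]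
    have hmem : row ∈ board := by
      have hsome : board[t + skip]? = some row := by
        rw [← List.getElem?_drop, ← hrowsdef]
        have h0 := List.getElem?_drop (xs := rows) (i := skip) (j := 0)
        rw [hdrop] at h0
        simpa using h0.symm
      exact List.mem_of_getElem? hsome
    have he : PySem.List.pyGetD (PySem.List.pyGetD board (((t + skip : Nat)) : Int) []) (m - 1) 0
        = row.getD k 0 := by
      rw [PySem.List.pyGetD_natCast, hrow, hrowmem row hmem, PySem.List.pyGetD_natCast]
    have hAne : (fcol k rest).reverse ++ [row.getD k 0] ≠ [] := by simp
    rw [hsval]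
    simp only [hrlt, hAne, if_true, ne_eq, not_false_eq_true, he,
      hrow, PySem.List.pyGetD_neg_one_append_singleton,
      List.dropLast_concat]
    have hinv' : StInv board (stks.set k ((fcol k rest).reverse)) (tops.set k (t + skip + 1)) := by
      refine ⟨by simp [hsl], by simp [htl], ?_⟩
      intro j hj
      by_cases hjk : j = k
      · subst hjk
        have hset : ((tops.set k (t + skip + 1)).getD k 0) = t + skip + 1 := by
          simp [List.getD, htl ▸ hkw]
        have hset2 : ((stks.set k ((fcol k rest).reverse)).getD k []) = (fcol k rest).reverse := by
          simp [List.getD, hsl ▸ hkw]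
        constructor
        · rw [hset]; omega
        · rw [hset, hset2]
          have hbd : board.drop (t + skip + 1) = rest := by
            have h2 : rows.drop (skip + 1) = rest := by
              rw [← List.drop_drop (i := 1) (j := skip), hdrop]; rfl
            rw [← h2, hrowsdef, List.drop_drop]; ring_nf
          rw [hbd]
      · have hkj : ¬ (k = j) := fun h => hjk (Eq.symm h)
        have hset : ((tops.set k (t + skip + 1)).getD j 0) = tops.getD j 0 := by
          simp [List.getD, hkj]
        have hset2 : ((stks.set k ((fcol k rest).reverse)).getD j []) = stks.getD j [] := by
          simp [List.getD, hkj]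
        rw [hset, hset2]
        exact hcols j hj
    by_cases hcond : moved ≠ [] ∧ PySem.List.pyGetD moved (-1) 0 = row.getD k 0
    · rw [if_pos hcond, if_pos hcond]
      exact ⟨rfl, hinv'⟩
    · rw [if_neg hcond, if_neg hcond]
      exact ⟨rfl, hinv'⟩

lemma fold_eq (board : List (List Int)) (moves : List Int)
    (hmoves : ∀ m ∈ moves, 1 - (((board.headD []).length : Nat) : Int) ≤ m ∧
      m ≤ (((board.headD []).length : Nat) : Int))
    (hrect : (∃ m ∈ moves, m ≤ 0) → ∀ row ∈ board, row.length = (board.headD []).length) :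
    ∀ stks tops moved ans, StInv board stks tops →
      (moves.foldl stepA (stks, moved, ans)).2
        = (moves.foldl (stepB board) (tops, moved, ans)).2 := by
  induction moves with
  | nil => intro stks tops moved ans _; simp
  | cons m rest ih =>
    intro stks tops moved ans hInv
    obtain ⟨hm1, hm2⟩ := hmoves m (by simp)
    obtain ⟨h2, hInv'⟩ := step_eq board stks tops moved ans m hm1 hm2
      (fun h0 => hrect ⟨m, by simp, h0⟩) hInv
    simp only [List.foldl_cons]
    have hA : stepA (stks, moved, ans) m
        = ((stepA (stks, moved, ans) m).1, (stepB board (tops, moved, ans) m).2.1,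
           (stepB board (tops, moved, ans) m).2.2) := by
      rw [← h2]
    have hB : stepB board (tops, moved, ans) m
        = ((stepB board (tops, moved, ans) m).1, (stepB board (tops, moved, ans) m).2.1,
           (stepB board (tops, moved, ans) m).2.2) := by
      rfl
    rw [hA, hB]
    exact ih (fun x hx => hmoves x (by simp [hx]))
      (fun h => hrect (by obtain ⟨x, hx, h0⟩ := h; exact ⟨x, by simp [hx], h0⟩)) _ _ _ _ hInv'

lemma headD_eq (board : List (List Int)) :
    PySem.List.pyGetD board 0 [] = board.headD [] := by
  cases board <;> simp [PySem.List.pyGetD, PySem.List.pyGet?, PySem.List.pyIdx?]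

lemma build_col (board : List (List Int)) (k : Nat) :
    ((PySem.List.pyRange 0 ((board.length : Nat) : Int) 1).foldl (fun col j =>
        if PySem.List.pyGetD (PySem.List.pyGetD board j []) ((k : Nat) : Int) 0 ≠ 0 then
          col ++ [PySem.List.pyGetD (PySem.List.pyGetD board j []) ((k : Nat) : Int) 0]
        else col) [])
    = fcol k board := by
  rw [PySem.List.foldl_pyRange_zero_pyGetD' board [] (fun col row =>
        if PySem.List.pyGetD row ((k : Nat) : Int) 0 ≠ 0 then
          col ++ [PySem.List.pyGetD row ((k : Nat) : Int) 0] else col) []]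
  have h := PySem.List.foldl_append_if
      (fun row : List Int => decide (PySem.List.pyGetD row ((k : Nat) : Int) 0 ≠ 0))
      (fun row => PySem.List.pyGetD row ((k : Nat) : Int) 0) board []
  simp only [decide_eq_true_eq] at h
  rw [h, fcol, List.filter_map]
  simp only [Function.comp_def, List.nil_append]

lemma init_inv (board : List (List Int)) :
    StInv board
      ((PySem.List.pyRange 0 (((PySem.List.pyGetD board 0 []).length : Nat) : Int) 1).map (fun i =>
        ((PySem.List.pyRange 0 ((board.length : Nat) : Int) 1).foldl (fun col j =>
            if PySem.List.pyGetD (PySem.List.pyGetD board j []) i 0 ≠ 0 then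
              col ++ [PySem.List.pyGetD (PySem.List.pyGetD board j []) i 0]
            else col) []).reverse))
      (List.replicate (PySem.List.pyGetD board 0 []).length 0) := by
  refine ⟨by simp [PySem.List.length_pyRange_one, headD_eq], by simp [headD_eq], ?_⟩
  intro k hk
  rw [← headD_eq board] at hk
  constructor
  · simp
  · rw [List.getD_replicate _ hk]
    have hg := PySem.List.getElem?_map_pyRange_zero (fun i =>
      ((PySem.List.pyRange 0 ((board.length : Nat) : Int) 1).foldl (fun col j =>
            if PySem.List.pyGetD (PySem.List.pyGetD board j []) i 0 ≠ 0 then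
              col ++ [PySem.List.pyGetD (PySem.List.pyGetD board j []) i 0]
            else col) []).reverse) _ k hk
    rw [List.getD, hg]
    simp only [Option.getD_some, List.drop_zero]
    rw [build_col]

-- ===== VERDICT (by name: the statement is the Claim_ definition above) =====
theorem solution_spec : Claim_equal_solution := by
  intro board moves _hDom hPre
  unfold Spec_solution solution solution_alt
  obtain ⟨hne, _hmin, hmoves, hrect⟩ := hPre
  exact congrArg (fun p => p.2) (fold_eq board moves hmoves hrect _ _ [] 0 (init_inv board))
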